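-- pv_equiv track=rewrite | github.com/ishandutta2007/codeforces | ormlis/normal/1157/G.py | check
-- ===== SOURCE A (Python) =====
-- def check(a):
--     n = len(a)
--     m = len(a[0])
--     if a[0][-1] == 1:
--         flag = True
--     else:
--         flag = False
--     ones = [1] * m
--     zeros = [0] * m
--     r = [0] * n
--     c = [0] * m
--     for i in range(1, n):
--         if flag:
--             if a[i] == ones:
--                 continue
--             elif a[i] == zeros:
--                 r[i] ^= 1
--             else:
--                 return None, None
--         elif a[i] == ones:
--             r[i] ^= 1
--         elif a[i] == zeros:
--             continue
--         elif a[i] == sorted(a[i]):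
--             flag = True
--         elif a[i] == sorted(a[i], reverse=True):
--             flag = True
--             r[i] ^= 1
--         else:
--             return None, None
--     return r, c
-- ===== SOURCE B (Python) =====
-- def check(a):
--     n = len(a)
--     m = len(a[0])
--     flag0 = a[0][-1] == 1
--     ones = [1] * m
--     zeros = [0] * m
--     r = [0] * n
--     c = [0] * m
--     if flag0:
--         p = 1
--     else:
--         p = n
--         for i in range(1, n):
--             if a[i] != ones and a[i] != zeros:
--                 p = i
--                 break
--     # pre-pivot rows (ascending phase): all-ones rows need a flip
--     for i in range(1, p):
--         if a[i] == ones: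
--             r[i] = 1
--     start = p
--     if not flag0 and p < n:
--         row = a[p]
--         if row == sorted(row):
--             pass
--         elif row == sorted(row, reverse=True):
--             r[p] = 1
--         else:
--             return None, None
--         start = p + 1
--     # post-pivot rows (descending phase): must be constant, zeros need a flip
--     for i in range(start, n):
--         if a[i] == ones:
--             pass
--         elif a[i] == zeros:
--             r[i] = 1
--         else:
--             return None, None
--     return r, c
-- ===== Notes on version B (the rewrite author's own statement) =====
-- stated objective: alternative
-- what changed: A's single stateful loop carrying a phase flag is replaced by a pivot-split decomposition: find the first non-constant row, then run three phase-specific passes (pre-pivot constant rows, the monotone pivot row, post-pivot constant rows).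
-- outside the precondition, e.g. on check([[]]): A raises IndexError, B raises IndexError; on check([]): A raises IndexError, B raises IndexError
import Mathlib
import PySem

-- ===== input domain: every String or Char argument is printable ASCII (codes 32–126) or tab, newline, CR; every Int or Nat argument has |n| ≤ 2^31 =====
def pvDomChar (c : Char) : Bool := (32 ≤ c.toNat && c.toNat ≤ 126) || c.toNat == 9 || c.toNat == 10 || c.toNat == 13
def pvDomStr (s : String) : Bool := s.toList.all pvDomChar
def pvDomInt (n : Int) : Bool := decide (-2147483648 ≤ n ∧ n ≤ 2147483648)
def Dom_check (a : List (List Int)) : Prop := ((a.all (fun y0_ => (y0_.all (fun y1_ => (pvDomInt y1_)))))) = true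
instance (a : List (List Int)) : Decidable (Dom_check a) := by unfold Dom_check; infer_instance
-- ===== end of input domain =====

-- B differs from A by decomposition only (pivot-split, three phase loops); objective: alternative.

-- ===== PORT A =====
-- r[i] ^= 1 (r[i] is always 0 or 1 here)
def pyXor (x y : Int) : Int := Int.xor x y

-- the for-loop of A: state = (flag, r); early `return None, None` = none
def checkLoop (a : List (List Int)) (ones zeros : List Int) :
    List Nat → Bool → List Int → Option (Bool × List Int)
  | [], flag, r => some (flag, r)
  | i :: t, flag, r =>
    let ai := a.getD i []
    if flag then
      if ai = ones then checkLoop a ones zeros t flag r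
      else if ai = zeros then checkLoop a ones zeros t flag (r.set i (pyXor (r.getD i 0) 1))
      else none
    else if ai = ones then checkLoop a ones zeros t flag (r.set i (pyXor (r.getD i 0) 1))
    else if ai = zeros then checkLoop a ones zeros t flag r
    else if ai = PySem.List.sorted ai (fun x => x) false then checkLoop a ones zeros t true r
    else if ai = PySem.List.sorted ai (fun x => x) true then
      checkLoop a ones zeros t true (r.set i (pyXor (r.getD i 0) 1))
    else none

def check (a : List (List Int)) : Option (List Int) × Option (List Int) :=
  let n := a.length
  let row0 := a.headD []
  match PySem.List.pyGet? row0 (-1) with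
  | none => (none, none)   -- a[0][-1] raises IndexError (a = [] or a[0] = []); excluded by Pre_check
  | some last =>
    let m := row0.length
    let flag := last == 1
    let ones := List.replicate m (1 : Int)
    let zeros := List.replicate m (0 : Int)
    let r := List.replicate n (0 : Int)
    let c := List.replicate m (0 : Int)
    match checkLoop a ones zeros (List.range' 1 (n - 1)) flag r with
    | none => (none, none)
    | some (_, r') => (some r', some c)

-- ===== PORT B =====
-- the pivot-search while/break loop: split indices at the first non-constant row
def splitConst (a : List (List Int)) (ones zeros : List Int) :
    List Nat → List Nat × List Nat
  | [] => ([], [])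
  | i :: t =>
    if a.getD i [] = ones ∨ a.getD i [] = zeros then
      let (p, q) := splitConst a ones zeros t
      (i :: p, q)
    else ([], i :: t)

-- pre-pivot loop: all-ones rows get r[i] = 1
def preLoop (a : List (List Int)) (ones : List Int) : List Nat → List Int → List Int
  | [], r => r
  | i :: t, r => preLoop a ones t (if a.getD i [] = ones then r.set i 1 else r)

-- post-pivot loop: rows must be constant, zeros get r[i] = 1; else invalid
def postLoop (a : List (List Int)) (ones zeros : List Int) :
    List Nat → List Int → Option (List Int)
  | [], r => some r
  | i :: t, r =>
    if a.getD i [] = ones then postLoop a ones zeros t r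
    else if a.getD i [] = zeros then postLoop a ones zeros t (r.set i 1)
    else none

def check_alt (a : List (List Int)) : Option (List Int) × Option (List Int) :=
  let n := a.length
  let row0 := a.headD []
  match PySem.List.pyGet? row0 (-1) with
  | none => (none, none)
  | some last =>
    let m := row0.length
    let flag0 := last == 1
    let ones := List.replicate m (1 : Int)
    let zeros := List.replicate m (0 : Int)
    let r := List.replicate n (0 : Int)
    let c := List.replicate m (0 : Int)
    let idxs := List.range' 1 (n - 1)
    if flag0 then
      match postLoop a ones zeros idxs r with
      | none => (none, none)
      | some r' => (some r', some c)
    else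
      let (pre, rest) := splitConst a ones zeros idxs
      let r1 := preLoop a ones pre r
      match rest with
      | [] => (some r1, some c)
      | p :: t =>
        let row := a.getD p []
        let r2? :=
          if row = PySem.List.sorted row (fun x => x) false then some r1
          else if row = PySem.List.sorted row (fun x => x) true then some (r1.set p 1)
          else none
        match r2? with
        | none => (none, none)
        | some r2 =>
          match postLoop a ones zeros t r2 with
          | none => (none, none)
          | some r' => (some r', some c)

-- ===== PRECONDITION & SPEC =====
-- Pre_check excludes exactly the inputs where A raises IndexError: a empty (len(a[0])) or a[0] empty (a[0][-1]).
def Pre_check (a : List (List Int)) : Prop := a ≠ [] ∧ a.headD [] ≠ []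
instance (a : List (List Int)) : Decidable (Pre_check a) := by unfold Pre_check; infer_instance
def pvWitness_check : List (List Int) := [[0, 1], [1, 1], [0, 0]]

def Spec_check (a : List (List Int)) (out : Option (List Int) × Option (List Int)) : Prop := out = check_alt a
instance (a : List (List Int)) (out : Option (List Int) × Option (List Int)) : Decidable (Spec_check a out) := by unfold Spec_check; infer_instance

-- ===== CLAIM (what is proved, stated in full; the proofs are below) =====
def Claim_equal_check : Prop := ∀ (a : List (List Int)), Dom_check a → Pre_check a → Spec_check a (check a)

-- ===== LEMMAS AND PROOFS =====

-- an invariant: every index still to be processed holds 0 in r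
def InvR (l : List Nat) (r : List Int) : Prop := ∀ j ∈ l, r[j]? = some 0

theorem inv_set {l : List Nat} {r : List Int} {i : Nat} (h : InvR l r) (hi : i ∉ l) (v : Int) :
    InvR l (r.set i v) := by
  intro j hj
  rw [List.getElem?_set_ne (by rintro rfl; exact hi hj)]
  exact h j hj


theorem pyXor_zero_one : pyXor 0 1 = 1 := by decide

-- true-phase: A's loop with flag = true is B's postLoop
theorem checkLoop_true (a : List (List Int)) (ones zeros : List Int)
    (l : List Nat) (r : List Int) (hnd : l.Nodup) (hinv : InvR l r) :
    checkLoop a ones zeros l true r =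
      (postLoop a ones zeros l r).map (fun r' => (true, r')) := by
  induction l generalizing r with
  | nil => simp [checkLoop, postLoop]
  | cons i t ih =>
    have hnd' : t.Nodup := hnd.of_cons
    have hi : i ∉ t := (List.nodup_cons.mp hnd).1
    have hinv' : InvR t r := fun j hj => hinv j (List.mem_cons_of_mem _ hj)
    simp only [checkLoop, postLoop, List.getD, if_true]
    by_cases h1 : a[i]?.getD [] = ones
    · rw [if_pos h1, if_pos h1]
      exact ih r hnd' hinv'
    · rw [if_neg h1, if_neg h1]
      by_cases h0 : a[i]?.getD [] = zeros
      · rw [if_pos h0, if_pos h0]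
        have hr0 : r[i]?.getD 0 = 0 := by
          have h2 := hinv i (List.mem_cons_self ..); simp [h2]
        rw [hr0, pyXor_zero_one]
        exact ih _ hnd' (inv_set hinv' hi 1)
      · rw [if_neg h0, if_neg h0]
        rfl

-- false-phase: A's loop equals B's pivot-split decomposition
theorem checkLoop_false (a : List (List Int)) (ones zeros : List Int)
    (l : List Nat) (r : List Int) (hnd : l.Nodup) (hinv : InvR l r) :
    checkLoop a ones zeros l false r =
      (match splitConst a ones zeros l with
       | (pre, rest) =>
         let r1 := preLoop a ones pre r
         match rest with
         | [] => some (false, r1)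
         | p :: t =>
           let row := a.getD p []
           if row = PySem.List.sorted row (fun x => x) false then
             (postLoop a ones zeros t r1).map (fun r' => (true, r'))
           else if row = PySem.List.sorted row (fun x => x) true then
             (postLoop a ones zeros t (r1.set p 1)).map (fun r' => (true, r'))
           else none) := by
  induction l generalizing r with
  | nil => simp [checkLoop, splitConst, preLoop]
  | cons i t ih =>
    have hnd' : t.Nodup := hnd.of_cons
    have hi : i ∉ t := (List.nodup_cons.mp hnd).1
    have hinv' : InvR t r := fun j hj => hinv j (List.mem_cons_of_mem _ hj)
    have hr0 : r[i]?.getD 0 = 0 := by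
      have h2 := hinv i (List.mem_cons_self ..); simp [h2]
    simp only [checkLoop, splitConst, List.getD, if_neg Bool.false_ne_true]
    by_cases h1 : a[i]?.getD [] = ones
    · -- constant (ones) row: stays in false phase, r[i] := 1
      rw [if_pos h1, if_pos (Or.inl h1), hr0, pyXor_zero_one,
        ih (r.set i 1) hnd' (inv_set hinv' hi 1)]
      cases hsp : splitConst a ones zeros t with
      | mk pre rest =>
        simp only [preLoop, List.getD, if_pos h1]
        cases rest <;> rfl
    · rw [if_neg h1]
      by_cases h0 : a[i]?.getD [] = zeros
      · -- constant (zeros) row: stays in false phase, r unchanged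
        rw [if_pos h0, if_pos (Or.inr h0), ih r hnd' hinv']
        cases hsp : splitConst a ones zeros t with
        | mk pre rest =>
        simp only [preLoop, List.getD, if_neg h1]
        cases rest <;> rfl
      · -- pivot row
        have hc : ¬ (a[i]?.getD [] = ones ∨ a[i]?.getD [] = zeros) := by tauto
        rw [if_neg h0, if_neg hc]
        by_cases hs : a[i]?.getD [] = PySem.List.sorted (a[i]?.getD []) (fun x => x) false
        · rw [if_pos hs, checkLoop_true a ones zeros t r hnd' hinv']
          simp only [preLoop]
          rw [if_pos hs]
        · rw [if_neg hs]
          by_cases hsr : a[i]?.getD [] = PySem.List.sorted (a[i]?.getD []) (fun x => x) true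
          · rw [if_pos hsr, hr0, pyXor_zero_one,
              checkLoop_true a ones zeros t (r.set i 1) hnd' (inv_set hinv' hi 1)]
            simp only [preLoop]
            rw [if_neg hs, if_pos hsr]
          · rw [if_neg hsr]
            simp only [preLoop]
            rw [if_neg hs, if_neg hsr]

theorem inv_replicate (n : Nat) (l : List Nat) (hl : ∀ j ∈ l, j < n) :
    InvR l (List.replicate n (0 : Int)) := by
  intro j hj
  rw [List.getElem?_replicate, if_pos (hl j hj)]

-- ===== VERDICT (by name: the statement is the Claim_ definition above) =====
theorem check_spec : Claim_equal_check := by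
  intro a _ _
  unfold Spec_check
  simp only [check, check_alt]
  cases hg : PySem.List.pyGet? (a.headD []) (-1) with
  | none => rfl
  | some last =>
    simp only []
    set n := a.length
    set m := (a.headD []).length
    set ones := List.replicate m (1 : Int)
    set zeros := List.replicate m (0 : Int)
    set r := List.replicate n (0 : Int) with hr
    set idxs := List.range' 1 (n - 1) with hidxs
    have hnd : idxs.Nodup := List.nodup_range'
    have hinv : InvR idxs r := by
      apply inv_replicate
      intro j hj
      rw [hidxs] at hj
      rw [List.mem_range'] at hj
      obtain ⟨i, hi, rfl⟩ := hj
      omega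
    by_cases hf : (last == 1) = true
    · rw [hf]
      rw [if_pos rfl, checkLoop_true a ones zeros idxs r hnd hinv]
      cases postLoop a ones zeros idxs r <;> rfl
    · rw [Bool.not_eq_true] at hf
      rw [hf]
      rw [if_neg (by simp), checkLoop_false a ones zeros idxs r hnd hinv]
      cases hsp : splitConst a ones zeros idxs with
      | mk pre rest =>
        cases rest with
        | nil => rfl
        | cons p t =>
          simp only []
          by_cases hs : a.getD p [] = PySem.List.sorted (a.getD p []) (fun x => x) false
          · rw [if_pos hs, if_pos hs]
            cases hpl : postLoop a ones zeros t (preLoop a ones pre r) <;> simp [hpl]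
          · rw [if_neg hs, if_neg hs]
            by_cases hsr : a.getD p [] = PySem.List.sorted (a.getD p []) (fun x => x) true
            · rw [if_pos hsr, if_pos hsr]
              cases hpl : postLoop a ones zeros t ((preLoop a ones pre r).set p 1) <;> simp [hpl]
            · rw [if_neg hsr, if_neg hsr]
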